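-- pv_equiv track=rewrite | github.com/maxkashyap41/pythonDSA | FooBar/Already_did_that.py | Base10_nBase
-- ===== SOURCE A (Python) =====
-- def Base10_nBase(num, base):
--     i = 1
--     res = 0
--     while num > 0:
--         res = res+(num % base)*i
--         i = i*10
--         num = num // base
--
--     return res
-- ===== SOURCE B (Python) =====
-- def Base10_nBase(num, base):
--     if num <= 0:
--         return 0
--     return Base10_nBase(num // base, base) * 10 + num % base
-- ===== Notes on version B (the rewrite author's own statement) =====
-- stated objective: alternative
-- what changed: A is an iterative while-loop accumulating res with an explicit place-value multiplier i; B is a direct recursion with no accumulator that builds the result on return (Horner: recurse on num//base, then *10 + num%base).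
import Mathlib
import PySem

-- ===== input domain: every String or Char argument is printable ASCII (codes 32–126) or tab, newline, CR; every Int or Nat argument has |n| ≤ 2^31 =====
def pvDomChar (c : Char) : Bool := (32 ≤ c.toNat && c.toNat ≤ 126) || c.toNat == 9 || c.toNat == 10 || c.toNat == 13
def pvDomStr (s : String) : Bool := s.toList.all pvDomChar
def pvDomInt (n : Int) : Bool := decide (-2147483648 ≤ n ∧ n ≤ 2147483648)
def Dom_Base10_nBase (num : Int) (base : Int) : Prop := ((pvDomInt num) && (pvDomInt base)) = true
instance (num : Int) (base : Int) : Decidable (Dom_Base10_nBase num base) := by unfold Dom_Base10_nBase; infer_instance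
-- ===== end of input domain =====

-- B replaces A's iterative place-value accumulation (while-loop with multiplier i)
-- by a direct recursion that builds the result on return (alternative decomposition).


-- termination helper: the loop/recursion variable's toNat strictly decreases
theorem pvStep_lt (num base : Int) (h1 : 0 < num) (h2 : base ≠ 0) (h3 : base ≠ 1) :
    (PySem.Int.floordiv num base).toNat < num.toNat := by
  have he := PySem.Int.floordiv_mul_add_mod num base
  rcases lt_trichotomy base 0 with hb | hb | hb
  · have hm := PySem.Int.mod_neg_bounds num hb
    have hq : PySem.Int.floordiv num base < 0 := by nlinarith
    omega
  · exact absurd hb h2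
  · have hm0 := PySem.Int.mod_nonneg num hb
    have hmb := PySem.Int.mod_lt num hb
    have hq0 : 0 ≤ PySem.Int.floordiv num base := by nlinarith
    have hb2 : 2 ≤ base := by omega
    have h4 : 2 * PySem.Int.floordiv num base ≤ PySem.Int.floordiv num base * base := by
      nlinarith [mul_le_mul_of_nonneg_left hb2 hq0]
    have : PySem.Int.floordiv num base < num := by nlinarith
    omega

-- ===== PORT A =====
-- i = 1; res = 0; while num > 0: res += (num % base)*i; i *= 10; num //= base
-- (the base ≠ 0 / base ≠ 1 guards only make the recursion total: base = 0 raises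
--  ZeroDivisionError in Python, base = 1 with num > 0 loops forever; both outside Pre_)
def pvALoop (num base i res : Int) : Int :=
  if h : 0 < num ∧ base ≠ 0 ∧ base ≠ 1 then
    pvALoop (PySem.Int.floordiv num base) base (i * 10) (res + (PySem.Int.mod num base) * i)
  else res
termination_by num.toNat
decreasing_by exact pvStep_lt num base h.1 h.2.1 h.2.2

def Base10_nBase (num : Int) (base : Int) : Int := pvALoop num base 1 0

-- ===== PORT B =====
-- if num <= 0: return 0; return Base10_nBase(num // base, base) * 10 + num % base
-- (the base = 0 / base = 1 disjuncts only make the recursion total, outside Pre_)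
def Base10_nBase_alt (num : Int) (base : Int) : Int :=
  if hz : num ≤ 0 ∨ base = 0 ∨ base = 1 then 0
  else Base10_nBase_alt (PySem.Int.floordiv num base) base * 10 + PySem.Int.mod num base
termination_by num.toNat
decreasing_by
  exact pvStep_lt num base (by omega) (fun c => hz (Or.inr (Or.inl c))) (fun c => hz (Or.inr (Or.inr c)))

-- ===== PRECONDITION & SPEC =====
-- Pre_ excludes only inputs where A never returns: base = 0 with num > 0 (ZeroDivisionError)
-- and base = 1 with num > 0 (the loop never terminates); no returning input is excluded.
def Pre_Base10_nBase (num : Int) (base : Int) : Prop := 0 < num → (base ≠ 0 ∧ base ≠ 1)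
instance (num : Int) (base : Int) : Decidable (Pre_Base10_nBase num base) := by unfold Pre_Base10_nBase; infer_instance
def pvWitness_Base10_nBase : Int × Int := (100, 2)

def Spec_Base10_nBase (num : Int) (base : Int) (out : Int) : Prop := out = Base10_nBase_alt num base
instance (num : Int) (base : Int) (out : Int) : Decidable (Spec_Base10_nBase num base out) := by unfold Spec_Base10_nBase; infer_instance

-- ===== CLAIM (what is proved, stated in full; the proofs are below) =====
def Claim_equal_Base10_nBase : Prop := ∀ (num : Int) (base : Int), Dom_Base10_nBase num base → Pre_Base10_nBase num base → Spec_Base10_nBase num base (Base10_nBase num base)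

-- ===== LEMMAS AND PROOFS =====

-- loop invariant: A's tail-recursive loop equals res + i * (B's recursion)
theorem pvMain (num base i res : Int) :
    pvALoop num base i res = res + i * Base10_nBase_alt num base := by
  induction hn : num.toNat using Nat.strong_induction_on generalizing num i res with
  | _ n ih =>
    rw [pvALoop]
    conv_rhs => rw [Base10_nBase_alt]
    split
    · next h =>
      have hlt := pvStep_lt num base h.1 h.2.1 h.2.2
      rw [ih _ (hn ▸ hlt) _ _ _ rfl]
      rw [dif_neg (by push_neg; omega)]
      ring
    · next h =>
      rw [dif_pos (by push_neg at h; omega)]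
      ring

-- ===== VERDICT (by name: the statement is the Claim_ definition above) =====
theorem Base10_nBase_spec : Claim_equal_Base10_nBase := by
  intro num base _ _
  show Base10_nBase num base = Base10_nBase_alt num base
  rw [Base10_nBase, pvMain]
  ring
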